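-- pv_equiv track=rewrite | github.com/cmorg789/Vox | src/vox/validators.py | check_mime
-- ===== SOURCE A (Python) =====
-- def check_mime(mime: str, allowlist: str) -> bool:
--     """Check if a MIME type matches a comma-separated allowlist (supports type/* and */* wildcards)."""
--     allowed = [s.strip() for s in allowlist.split(",") if s.strip()]
--     for pattern in allowed:
--         if pattern == "*/*":
--             return True
--         if pattern == mime:
--             return True
--         if pattern.endswith("/*") and mime.startswith(pattern[:-1]):
--             return True
--     return False
-- ===== SOURCE B (Python) =====
-- def check_mime(mime: str, allowlist: str) -> bool:
--     """Check if a MIME type matches a comma-separated allowlist (supports type/* and */* wildcards)."""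
--     allowed = {s.strip() for s in allowlist.split(",") if s.strip()}
--     candidates = {"*/*", mime}
--     for i, ch in enumerate(mime):
--         if ch == "/":
--             candidates.add(mime[:i] + "/*")
--     return bool(candidates & allowed)
-- ===== Notes on version B (the rewrite author's own statement) =====
-- stated objective: alternative
-- what changed: Inverts the matching: instead of scanning the allowlist and testing each pattern against the mime, B generates the full set of patterns that could match this mime ('*/*', the mime itself, and prefix+'/*' for every slash position) and returns whether that candidate set intersects the parsed allowlist set.
import Mathlib
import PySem

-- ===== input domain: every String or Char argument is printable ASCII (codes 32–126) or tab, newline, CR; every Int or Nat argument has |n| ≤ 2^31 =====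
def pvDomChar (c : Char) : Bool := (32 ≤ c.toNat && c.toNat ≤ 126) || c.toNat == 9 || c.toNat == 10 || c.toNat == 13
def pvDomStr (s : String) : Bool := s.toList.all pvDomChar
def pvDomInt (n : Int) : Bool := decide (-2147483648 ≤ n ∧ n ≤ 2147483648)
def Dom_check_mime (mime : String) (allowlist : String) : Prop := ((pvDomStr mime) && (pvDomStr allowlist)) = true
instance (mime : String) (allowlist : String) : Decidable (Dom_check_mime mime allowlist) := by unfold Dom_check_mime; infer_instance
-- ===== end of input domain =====

-- B inverts the matching: it builds the set of patterns that could match the mime and intersects it with the parsed allowlist set (alternative decomposition, same cost class).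


-- ===== PORT A =====
-- allowed = [s.strip() for s in allowlist.split(",") if s.strip()]
def pvAllowedA (allowlist : List Char) : List (List Char) :=
  ((PySem.Chars.splitOn allowlist [',']).filter
    (fun s => PySem.Chars.strip s ≠ [])).map PySem.Chars.strip

-- the 'for pattern in allowed' loop with its three early returns
def pvLoopA (mime : List Char) : List (List Char) → Bool
  | [] => false
  | p :: rest =>
    if p = ['*', '/', '*'] then true
    else if p = mime then true
    else if PySem.Chars.endswith p ['/', '*'] &&
            PySem.Chars.startswith mime (PySem.Chars.slice p none (some (-1))) then true
    else pvLoopA mime rest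

def check_mime (mime : String) (allowlist : String) : Bool :=
  pvLoopA mime.toList (pvAllowedA allowlist.toList)

-- ===== PORT B =====
-- allowed = {s.strip() for s in allowlist.split(",") if s.strip()}
def pvAllowedB (allowlist : List Char) : PySem.Set (List Char) :=
  PySem.Set.ofList
    (((PySem.Chars.splitOn allowlist [',']).map PySem.Chars.strip).filter (fun s => s ≠ []))

-- candidates = {"*/*", mime}; for i, ch in enumerate(mime): if ch == "/": candidates.add(mime[:i] + "/*")
def pvCandidates (m : List Char) : PySem.Set (List Char) :=
  (PySem.List.enumerate m).foldl
    (fun c ic =>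
      if ic.2 = '/' then PySem.Set.add c (PySem.Chars.slice m none (some ic.1) ++ ['/', '*'])
      else c)
    (PySem.Set.ofList [['*', '/', '*'], m])

def check_mime_alt (mime : String) (allowlist : String) : Bool :=
  !(PySem.Set.inter (pvCandidates mime.toList) (pvAllowedB allowlist.toList)).isEmpty

-- ===== PRECONDITION & SPEC =====
def Spec_check_mime (mime : String) (allowlist : String) (out : Bool) : Prop := out = check_mime_alt mime allowlist
instance (mime : String) (allowlist : String) (out : Bool) : Decidable (Spec_check_mime mime allowlist out) := by unfold Spec_check_mime; infer_instance

-- ===== CLAIM (what is proved, stated in full; the proofs are below) =====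
def Claim_equal_check_mime : Prop := ∀ (mime : String) (allowlist : String), Dom_check_mime mime allowlist → Spec_check_mime mime allowlist (check_mime mime allowlist)

-- ===== LEMMAS AND PROOFS =====

-- A's pattern test, as a predicate
def pvMatch (m p : List Char) : Prop :=
  p = ['*', '/', '*'] ∨ p = m ∨
    (PySem.Chars.endswith p ['/', '*'] = true ∧
     PySem.Chars.startswith m p.dropLast = true)

theorem pvLoopA_eq_true_iff (m : List Char) (l : List (List Char)) :
    pvLoopA m l = true ↔ ∃ p ∈ l, pvMatch m p := by
  induction l with
  | nil => simp [pvLoopA, pvMatch]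
  | cons p rest ih =>
    simp only [pvLoopA]
    split_ifs with h1 h2 h3
    · simp [pvMatch, h1]
    · simp [pvMatch, h2]
    · simp only [Bool.and_eq_true] at h3
      constructor
      · intro _
        refine ⟨p, by simp, Or.inr (Or.inr ?_)⟩
        simpa [PySem.Chars.slice_eq_listSlice, PySem.List.slice_to_neg_one] using h3
      · simp
    · rw [ih]
      constructor
      · rintro ⟨q, hq, hm⟩; exact ⟨q, by simp [hq], hm⟩
      · rintro ⟨q, hq, hm⟩
        rcases List.mem_cons.mp hq with rfl | hq'
        · exfalso
          rcases hm with h | h | ⟨he, hs⟩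
          · exact h1 h
          · exact h2 h
          · exact h3 (by
              simp [PySem.Chars.slice_eq_listSlice, PySem.List.slice_to_neg_one, he, hs])
        · exact ⟨q, hq', hm⟩

-- membership in B's candidate set
theorem foldl_add_if_mem (m x : List Char) (l : List (Int × Char)) (s : PySem.Set (List Char)) :
    x ∈ l.foldl (fun c ic =>
        if ic.2 = '/' then PySem.Set.add c (PySem.Chars.slice m none (some ic.1) ++ ['/', '*'])
        else c) s ↔
      x ∈ s ∨ ∃ p ∈ l, p.2 = '/' ∧ x = PySem.Chars.slice m none (some p.1) ++ ['/', '*'] := by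
  induction l generalizing s with
  | nil => simp
  | cons a t ih =>
    simp only [List.foldl_cons]
    by_cases ha : a.2 = '/'
    · rw [if_pos ha, ih, PySem.Set.mem_add]
      constructor
      · rintro (⟨hs | rfl⟩ | ⟨p, hp, h⟩)
        · exact Or.inl hs
        · exact Or.inr ⟨a, by simp, ha, rfl⟩
        · exact Or.inr ⟨p, by simp [hp], h⟩
      · rintro (hs | ⟨p, hp, hc, rfl⟩)
        · exact Or.inl (Or.inl hs)
        · rcases List.mem_cons.mp hp with rfl | hp'
          · exact Or.inl (Or.inr rfl)
          · exact Or.inr ⟨p, hp', hc, rfl⟩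
    · rw [if_neg ha, ih]
      constructor
      · rintro (hs | ⟨p, hp, h⟩)
        · exact Or.inl hs
        · exact Or.inr ⟨p, by simp [hp], h⟩
      · rintro (hs | ⟨p, hp, hc, rfl⟩)
        · exact Or.inl hs
        · rcases List.mem_cons.mp hp with rfl | hp'
          · exact absurd hc ha
          · exact Or.inr ⟨p, hp', hc, rfl⟩

theorem mem_pvCandidates (m x : List Char) :
    x ∈ pvCandidates m ↔
      x = ['*', '/', '*'] ∨ x = m ∨
        ∃ (i : Nat) (_ : i < m.length), m[i] = '/' ∧ x = m.take i ++ ['/', '*'] := by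
  unfold pvCandidates
  rw [foldl_add_if_mem]
  rw [PySem.Set.mem_ofList]
  simp only [List.mem_cons, List.not_mem_nil, or_false]
  constructor
  · rintro ((rfl | rfl) | ⟨p, hp, hc, rfl⟩)
    · exact Or.inl rfl
    · exact Or.inr (Or.inl rfl)
    · rcases (PySem.List.mem_enumerate_iff m 0 p).mp hp with ⟨k, hk, rfl⟩
      refine Or.inr (Or.inr ⟨k, hk, by simpa using hc, ?_⟩)
      simp [PySem.Chars.slice_eq_listSlice, PySem.List.slice_to_natCast]
  · rintro (rfl | rfl | ⟨i, hi, hc, rfl⟩)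
    · exact Or.inl (Or.inl rfl)
    · exact Or.inl (Or.inr rfl)
    · refine Or.inr ⟨((0 : Int) + i, m[i]), ?_, by simpa using hc, ?_⟩
      · exact (PySem.List.mem_enumerate_iff m 0 _).mpr ⟨i, hi, rfl⟩
      · simp [PySem.Chars.slice_eq_listSlice, PySem.List.slice_to_natCast]

-- A's suffix/prefix wildcard test, characterised by the slash positions of the mime
theorem pvMatch_wild_iff (m p : List Char) :
    (PySem.Chars.endswith p ['/', '*'] = true ∧
     PySem.Chars.startswith m p.dropLast = true) ↔
      ∃ (i : Nat) (_ : i < m.length), m[i] = '/' ∧ p = m.take i ++ ['/', '*'] := by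
  rw [PySem.Chars.endswith_iff, PySem.Chars.startswith_iff]
  constructor
  · rintro ⟨⟨q, rfl⟩, hpre⟩
    have hd : (q ++ ['/', '*']).dropLast = q ++ ['/'] := by
      rw [show q ++ ['/', '*'] = (q ++ ['/']) ++ ['*'] by simp, List.dropLast_concat]
    rw [hd] at hpre
    rcases hpre with ⟨r, hr⟩
    subst hr
    exact ⟨q.length, by simp, by simp, by simp⟩
  · rintro ⟨i, hi, hc, rfl⟩
    refine ⟨⟨m.take i, rfl⟩, ?_⟩
    have hd : (m.take i ++ ['/', '*']).dropLast = m.take i ++ ['/'] := by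
      rw [show m.take i ++ ['/', '*'] = (m.take i ++ ['/']) ++ ['*'] by simp, List.dropLast_concat]
    rw [hd]
    refine ⟨m.drop (i + 1), ?_⟩
    have hdrop : m.drop i = '/' :: m.drop (i + 1) := by
      rw [List.drop_eq_getElem_cons hi, hc]
    calc (m.take i ++ ['/']) ++ m.drop (i + 1)
        = m.take i ++ ('/' :: m.drop (i + 1)) := by simp
      _ = m.take i ++ m.drop i := by rw [hdrop]
      _ = m := List.take_append_drop i m

-- the two parses of the allowlist pick out the same patterns
theorem mem_pvAllowedB_iff (al : List Char) (y : List Char) :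
    y ∈ pvAllowedB al ↔ y ∈ pvAllowedA al := by
  unfold pvAllowedA pvAllowedB
  rw [PySem.Set.mem_ofList]
  simp only [List.mem_filter, List.mem_map, decide_not, Bool.not_eq_eq_eq_not]
  constructor
  · rintro ⟨⟨s, hs, rfl⟩, hne⟩
    exact ⟨s, ⟨hs, by simpa using hne⟩, rfl⟩
  · rintro ⟨s, ⟨hs, hne⟩, rfl⟩
    exact ⟨⟨s, hs, rfl⟩, by simpa using hne⟩

theorem check_mime_iff (mime allowlist : String) :
    check_mime mime allowlist = check_mime_alt mime allowlist := by
  have h1 : check_mime mime allowlist = true ↔ check_mime_alt mime allowlist = true := by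
    unfold check_mime check_mime_alt
    rw [pvLoopA_eq_true_iff, Bool.not_eq_true', List.isEmpty_eq_false_iff_exists_mem]
    constructor
    · rintro ⟨p, hp, hm⟩
      refine ⟨p, (PySem.Set.mem_inter _ _ _).mpr ⟨?_, (mem_pvAllowedB_iff _ _).mpr hp⟩⟩
      rw [mem_pvCandidates]
      rcases hm with h | h | h
      · exact Or.inl h
      · exact Or.inr (Or.inl h)
      · exact Or.inr (Or.inr ((pvMatch_wild_iff _ _).mp h))
    · rintro ⟨p, hp⟩
      rcases (PySem.Set.mem_inter _ _ _).mp hp with ⟨hc, ha⟩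
      refine ⟨p, (mem_pvAllowedB_iff _ _).mp ha, ?_⟩
      rw [mem_pvCandidates] at hc
      rcases hc with h | h | h
      · exact Or.inl h
      · exact Or.inr (Or.inl h)
      · exact Or.inr (Or.inr ((pvMatch_wild_iff _ _).mpr h))
  cases hA : check_mime mime allowlist <;> cases hB : check_mime_alt mime allowlist <;>
    simp_all

-- ===== VERDICT (by name: the statement is the Claim_ definition above) =====
theorem check_mime_spec : Claim_equal_check_mime := by
  intro mime allowlist _
  unfold Spec_check_mime
  exact check_mime_iff mime allowlist
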